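-- pv_equiv track=rewrite | github.com/garam0107/IM | 파리퇴치3.py | remove1
-- ===== SOURCE A (Python) =====
-- def remove1(N,M,arr,i,j):
--     dr = [0,1,0,-1]
--     dc = [1,0,-1,0]
--
--     sum = arr[i][j]
--     for k in range(4):
--         for add in range(1,M):
--             nr = i + dr[k] * add
--             nc = j + dc[k] * add
--             if 0 <= nr < N and 0 <= nc < N:
--                 sum += arr[nr][nc]
--
--     return sum
-- ===== SOURCE B (Python) =====
-- def remove1(N, M, arr, i, j):
--     total = arr[i][j]
--     for r in range(min(N, len(arr))):
--         row = arr[r]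
--         for c in range(min(N, len(row))):
--             if (r, c) != (i, j) and ((r == i and abs(c - j) < M) or (c == j and abs(r - i) < M)):
--                 total += row[c]
--     return total
-- ===== Notes on version B (the rewrite author's own statement) =====
-- stated objective: alternative
-- what changed: Replaces the four direction-vector walks from the center by taking the center cell directly and then one row-major scan of the stored grid (clipped to N) that tests each other cell with a geometric cross-membership predicate (same row or same column and within distance M-1).
import Mathlib
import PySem

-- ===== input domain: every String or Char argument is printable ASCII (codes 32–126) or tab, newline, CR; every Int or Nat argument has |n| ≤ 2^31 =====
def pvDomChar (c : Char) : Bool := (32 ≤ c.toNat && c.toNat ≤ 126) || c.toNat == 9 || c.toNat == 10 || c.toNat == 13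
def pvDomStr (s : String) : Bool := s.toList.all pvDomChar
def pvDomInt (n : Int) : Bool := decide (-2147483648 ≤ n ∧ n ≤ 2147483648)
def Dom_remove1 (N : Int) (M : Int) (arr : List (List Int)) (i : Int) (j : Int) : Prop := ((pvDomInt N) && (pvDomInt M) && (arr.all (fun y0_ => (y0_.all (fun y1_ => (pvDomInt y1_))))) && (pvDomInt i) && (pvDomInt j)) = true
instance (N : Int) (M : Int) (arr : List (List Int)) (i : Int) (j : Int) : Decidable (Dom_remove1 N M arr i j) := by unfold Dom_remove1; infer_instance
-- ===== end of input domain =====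

-- B takes the center cell directly and then replaces A's four direction-vector walks by one
-- row-major scan of the stored grid (clipped to N) testing each other cell with a geometric
-- cross-membership predicate; objective: alternative.

-- ===== PORT A =====
def remove1 (N : Int) (M : Int) (arr : List (List Int)) (i : Int) (j : Int) : Int :=
  let dr : List Int := [0, 1, 0, -1]
  let dc : List Int := [1, 0, -1, 0]
  let sum0 : Int := ((PySem.List.pyGet? ((PySem.List.pyGet? arr i).getD []) j).getD 0)
  (PySem.List.pyRange 0 4 1).foldl (fun sum k =>
    (PySem.List.pyRange 1 M 1).foldl (fun sum add =>
      let nr := i + (PySem.List.pyGet? dr k).getD 0 * add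
      let nc := j + (PySem.List.pyGet? dc k).getD 0 * add
      if 0 ≤ nr ∧ nr < N ∧ 0 ≤ nc ∧ nc < N then
        sum + ((PySem.List.pyGet? ((PySem.List.pyGet? arr nr).getD []) nc).getD 0)
      else sum) sum) sum0

-- ===== PORT B =====
def remove1_alt (N : Int) (M : Int) (arr : List (List Int)) (i : Int) (j : Int) : Int :=
  let total0 : Int := ((PySem.List.pyGet? ((PySem.List.pyGet? arr i).getD []) j).getD 0)
  (PySem.List.pyRange 0 (min N (PySem.List.len arr)) 1).foldl (fun total r =>
    let row := (PySem.List.pyGet? arr r).getD []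
    (PySem.List.pyRange 0 (min N (PySem.List.len row)) 1).foldl (fun total c =>
      if ¬(r = i ∧ c = j) ∧ ((r = i ∧ |c - j| < M) ∨ (c = j ∧ |r - i| < M)) then
        total + ((PySem.List.pyGet? row c).getD 0)
      else total) total) total0

-- ===== PRECONDITION & SPEC =====
-- Pre_ is exactly the inputs on which the Python A returns normally (no IndexError): the center
-- arr[i][j] is indexable (Python indexing, negative i/j from the end) and every cross cell
-- inside [0,N)² that the arms reach is present in arr.
def Pre_remove1 (N : Int) (M : Int) (arr : List (List Int)) (i : Int) (j : Int) : Prop :=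
  PySem.Raise.InRange arr.length i ∧
  PySem.Raise.InRange (((PySem.List.pyGet? arr i).getD []).length) j ∧
  (0 ≤ i ∧ i < N → min N (j + M) ≤ ((((PySem.List.pyGet? arr i).getD []).length : Int))) ∧
  (0 ≤ j ∧ j < N → min N (i + M) ≤ (arr.length : Int) ∧
    ∀ r ∈ PySem.List.pyRange (max 0 (i - M + 1)) (min N (i + M)) 1,
      r = i ∨ j < (((PySem.List.pyGet? arr r).getD []).length : Int))
instance (N : Int) (M : Int) (arr : List (List Int)) (i : Int) (j : Int) : Decidable (Pre_remove1 N M arr i j) := by unfold Pre_remove1; infer_instance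

def pvWitness_remove1 : Int × Int × List (List Int) × Int × Int := (2, 2, [[1, 2], [3, 4]], 0, 1)

def Spec_remove1 (N : Int) (M : Int) (arr : List (List Int)) (i : Int) (j : Int) (out : Int) : Prop := out = remove1_alt N M arr i j
instance (N : Int) (M : Int) (arr : List (List Int)) (i : Int) (j : Int) (out : Int) : Decidable (Spec_remove1 N M arr i j out) := by unfold Spec_remove1; infer_instance

-- ===== CLAIM (what is proved, stated in full; the proofs are below) =====
def Claim_equal_remove1 : Prop := ∀ (N : Int) (M : Int) (arr : List (List Int)) (i : Int) (j : Int), Dom_remove1 N M arr i j → Pre_remove1 N M arr i j → Spec_remove1 N M arr i j (remove1 N M arr i j)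

-- ===== LEMMAS AND PROOFS =====

-- 'if c: s += v' as 's += (if c then v else 0)', summed (via PySem.List.foldl_add).
lemma foldl_ite_add (l : List Int) (C : Int → Prop) [DecidablePred C] (g : Int → Int) (init : Int) :
    l.foldl (fun s a => if C a then s + g a else s) init
      = init + (l.map (fun a => if C a then g a else 0)).sum := by
  have h : (fun (s : Int) a => if C a then s + g a else s)
      = fun (s : Int) a => s + (if C a then g a else 0) := by
    funext s a; split <;> simp
  rw [h, PySem.List.foldl_add]

-- a guarded sum whose guard never holds is 0.
lemma sum_map_ite_zero {P : Int → Prop} [DecidablePred P] (g : Int → Int) (l : List Int)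
    (h : ∀ x ∈ l, ¬ P x) :
    (l.map (fun c => if P c then g c else 0)).sum = 0 := by
  apply List.sum_eq_zero
  intro x hx
  obtain ⟨c, hc, rfl⟩ := List.mem_map.mp hx
  rw [if_neg (h c hc)]

-- picking out the single index t from a range.
lemma sum_if_eq (g : Int → Int) (a b t : Int) :
    ((PySem.List.pyRange a b 1).map (fun c => if c = t then g c else 0)).sum
      = if a ≤ t ∧ t < b then g t else 0 := by
  by_cases h : a ≤ t ∧ t < b
  · rw [PySem.List.pyRange_one_append a t b h.1 (by omega),
        PySem.List.pyRange_one_cons h.2, List.map_append, List.sum_append,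
        List.map_cons, List.sum_cons, if_pos rfl, if_pos h,
        sum_map_ite_zero g _ (by
          intro x hx; rw [PySem.List.mem_pyRange_one] at hx; omega),
        sum_map_ite_zero g _ (by
          intro x hx; rw [PySem.List.mem_pyRange_one] at hx; omega)]
    ring
  · rw [if_neg h]
    apply sum_map_ite_zero
    intro x hx
    rw [PySem.List.mem_pyRange_one] at hx
    rintro rfl
    exact h ⟨hx.1, hx.2⟩

-- restricting a range sum by a lower bound clamps the lower end.
lemma sum_if_lower (f : Int → Int) (a b L : Int) :
    ((PySem.List.pyRange a b 1).map (fun c => if L ≤ c then f c else 0)).sum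
      = ((PySem.List.pyRange (max a L) b 1).map f).sum := by
  by_cases hL : L ≤ a
  · rw [max_eq_left hL]
    congr 1
    apply List.map_congr_left
    intro x hx
    rw [PySem.List.mem_pyRange_one] at hx
    rw [if_pos (by omega)]
  · by_cases hb : b ≤ L
    · rw [PySem.List.pyRange_one_eq_nil (show b ≤ max a L by omega)]
      simp only [List.map_nil, List.sum_nil]
      apply sum_map_ite_zero
      intro x hx; rw [PySem.List.mem_pyRange_one] at hx; omega
    · rw [max_eq_right (by omega : a ≤ L),
          PySem.List.pyRange_one_append a L b (by omega) (by omega),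
          List.map_append, List.sum_append,
          sum_map_ite_zero f (PySem.List.pyRange a L 1) (by
            intro x hx; rw [PySem.List.mem_pyRange_one] at hx; omega),
          zero_add]
      congr 1
      apply List.map_congr_left
      intro x hx
      rw [PySem.List.mem_pyRange_one] at hx
      rw [if_pos (by omega)]

-- restricting a range sum by an upper bound clamps the upper end.
lemma sum_if_upper (f : Int → Int) (a b U : Int) :
    ((PySem.List.pyRange a b 1).map (fun c => if c < U then f c else 0)).sum
      = ((PySem.List.pyRange a (min b U) 1).map f).sum := by
  by_cases hU : b ≤ U
  · rw [min_eq_left hU]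
    congr 1
    apply List.map_congr_left
    intro x hx
    rw [PySem.List.mem_pyRange_one] at hx
    rw [if_pos (by omega)]
  · by_cases ha : U ≤ a
    · rw [PySem.List.pyRange_one_eq_nil (show min b U ≤ a by omega)]
      simp only [List.map_nil, List.sum_nil]
      apply sum_map_ite_zero
      intro x hx; rw [PySem.List.mem_pyRange_one] at hx; omega
    · rw [min_eq_right (by omega : U ≤ b),
          PySem.List.pyRange_one_append a U b (by omega) (by omega),
          List.map_append, List.sum_append,
          sum_map_ite_zero f (PySem.List.pyRange U b 1) (by
            intro x hx; rw [PySem.List.mem_pyRange_one] at hx; omega),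
          add_zero]
      congr 1
      apply List.map_congr_left
      intro x hx
      rw [PySem.List.mem_pyRange_one] at hx
      rw [if_pos (by omega)]

-- two-sided restriction: a band inside a range clamps both ends.
lemma sum_if_band (f : Int → Int) (a b L U : Int) :
    ((PySem.List.pyRange a b 1).map (fun c => if L ≤ c ∧ c < U then f c else 0)).sum
      = ((PySem.List.pyRange (max a L) (min b U) 1).map f).sum := by
  have h : (fun c => if L ≤ c ∧ c < U then f c else 0)
      = fun c => if L ≤ c then (if c < U then f c else 0) else 0 := by
    funext c
    by_cases h1 : L ≤ c <;> by_cases h2 : c < U <;> simp [h1, h2]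
  rw [h, sum_if_lower (fun c => if c < U then f c else 0) a b L,
      sum_if_upper f (max a L) b U]

-- a constant conjunct factors out of a guarded range sum.
lemma sum_if_const (Q : Prop) [Decidable Q] (P : Int → Prop) [DecidablePred P]
    (g : Int → Int) (l : List Int) :
    (l.map (fun c => if Q ∧ P c then g c else 0)).sum
      = if Q then (l.map (fun c => if P c then g c else 0)).sum else 0 := by
  by_cases hQ : Q
  · rw [if_pos hQ]
    congr 1
    apply List.map_congr_left
    intro c _
    by_cases hP : P c
    · rw [if_pos ⟨hQ, hP⟩, if_pos hP]
    · rw [if_neg (fun h => hP h.2), if_neg hP]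
  · rw [if_neg hQ]
    exact sum_map_ite_zero g l (fun c _ h => hQ h.1)

-- a disjoint disjunction under an if splits into a sum of two ifs.
lemma ite_add_split (P1 P2 : Prop) [Decidable P1] [Decidable P2] (x : Int) (h : ¬(P1 ∧ P2)) :
    (if P1 ∨ P2 then x else 0) = (if P1 then x else 0) + (if P2 then x else 0) := by
  by_cases h1 : P1 <;> by_cases h2 : P2 <;> simp_all

-- nested ifs with 0 else-branches commute into one conjunction.
lemma ite_swap_conj (P Q : Prop) [Decidable P] [Decidable Q] (x : Int) :
    (if P then (if Q then x else 0) else 0) = if Q ∧ P then x else 0 := by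
  by_cases hP : P <;> by_cases hQ : Q <;> simp [hP, hQ]

-- forward arm: offsets 1..M-1 up from c, kept inside [0,N), as the clamped range.
lemma fwd2 (f : Int → Int) (N c M : Int) :
    ((PySem.List.pyRange 1 M 1).map (fun a => if 0 ≤ c + a ∧ c + a < N then f (c + a) else 0)).sum
      = ((PySem.List.pyRange (max 0 (c + 1)) (min N (c + M)) 1).map f).sum := by
  by_cases hM : M ≤ 1
  · rw [PySem.List.pyRange_one_eq_nil hM, PySem.List.pyRange_one_eq_nil (by omega)]
    simp
  · obtain ⟨n, rfl⟩ : ∃ n : Nat, M = 1 + (n : Int) := ⟨(M - 1).toNat, by omega⟩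
    clear hM
    induction n with
    | zero =>
      rw [PySem.List.pyRange_one_eq_nil (by omega), PySem.List.pyRange_one_eq_nil (by omega)]
      simp
    | succ n ih =>
      have h1 : (1 : Int) + ((n : Nat) + 1 : Nat) = (1 + (n : Int)) + 1 := by push_cast; ring
      rw [h1, PySem.List.pyRange_one_succ_right (by omega : (1 : Int) ≤ 1 + (n : Int)),
          List.map_append, List.sum_append, ih]
      by_cases hx : 0 ≤ c + (1 + (n : Int)) ∧ c + (1 + (n : Int)) < N
      · have hmin1 : min N (c + (1 + (n : Int))) = c + (1 + (n : Int)) := by omega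
        have hmin2 : min N (c + ((1 + (n : Int)) + 1)) = (c + (1 + (n : Int))) + 1 := by omega
        rw [hmin1, hmin2,
            PySem.List.pyRange_one_succ_right (by omega : max 0 (c + 1) ≤ c + (1 + (n : Int))),
            List.map_append, List.sum_append]
        simp [hx]
      · by_cases hneg : c + (1 + (n : Int)) < 0
        · rw [PySem.List.pyRange_one_eq_nil (show min N (c + (1 + (n : Int))) ≤ max 0 (c + 1) by omega),
              PySem.List.pyRange_one_eq_nil (show min N (c + ((1 + (n : Int)) + 1)) ≤ max 0 (c + 1) by omega)]
          simp [hx]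
        · have hmin : min N (c + ((1 + (n : Int)) + 1)) = min N (c + (1 + (n : Int))) := by omega
          rw [hmin]
          simp [hx]

-- backward arm: offsets 1..M-1 down from c, kept inside [0,N), as the clamped range.
lemma bwd2 (f : Int → Int) (N c M : Int) :
    ((PySem.List.pyRange 1 M 1).map (fun a => if 0 ≤ c - a ∧ c - a < N then f (c - a) else 0)).sum
      = ((PySem.List.pyRange (max 0 (c - M + 1)) (min N c) 1).map f).sum := by
  by_cases hM : M ≤ 1
  · rw [PySem.List.pyRange_one_eq_nil hM, PySem.List.pyRange_one_eq_nil (by omega)]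
    simp
  · obtain ⟨n, rfl⟩ : ∃ n : Nat, M = 1 + (n : Int) := ⟨(M - 1).toNat, by omega⟩
    clear hM
    induction n with
    | zero =>
      rw [PySem.List.pyRange_one_eq_nil (by omega), PySem.List.pyRange_one_eq_nil (by omega)]
      simp
    | succ n ih =>
      have h1 : (1 : Int) + ((n : Nat) + 1 : Nat) = (1 + (n : Int)) + 1 := by push_cast; ring
      rw [h1, PySem.List.pyRange_one_succ_right (by omega : (1 : Int) ≤ 1 + (n : Int)),
          List.map_append, List.sum_append, ih]
      by_cases hx : 0 ≤ c - (1 + (n : Int)) ∧ c - (1 + (n : Int)) < N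
      · have hmax1 : max 0 (c - (1 + (n : Int)) + 1) = (c - (1 + (n : Int))) + 1 := by omega
        have hmax2 : max 0 (c - ((1 + (n : Int)) + 1) + 1) = c - (1 + (n : Int)) := by omega
        rw [hmax1, hmax2,
            PySem.List.pyRange_one_cons (show c - (1 + (n : Int)) < min N c by omega),
            List.map_cons, List.sum_cons]
        simp only [List.map_cons, List.sum_cons, List.map_nil, List.sum_nil]
        rw [if_pos hx]
        ring
      · by_cases hneg : c - (1 + (n : Int)) < 0
        · have hmax : max 0 (c - ((1 + (n : Int)) + 1) + 1) = max 0 (c - (1 + (n : Int)) + 1) := by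
            omega
          rw [hmax]
          simp only [List.map_cons, List.map_nil, List.sum_cons, List.sum_nil, if_neg hx, add_zero]
        · rw [PySem.List.pyRange_one_eq_nil (show min N c ≤ max 0 (c - (1 + (n : Int)) + 1) by omega),
              PySem.List.pyRange_one_eq_nil (show min N c ≤ max 0 (c - ((1 + (n : Int)) + 1) + 1) by omega)]
          simp only [List.map_cons, List.map_nil, List.sum_cons, List.sum_nil, if_neg hx, add_zero]

-- terms beyond L vanish, so a scan of [0,N) may be truncated to [0, min N L).
lemma sum_truncate (g : Int → Int) (N L : Int) (h : ∀ c, L ≤ c → g c = 0) :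
    ((PySem.List.pyRange 0 N 1).map g).sum = ((PySem.List.pyRange 0 (min N L) 1).map g).sum := by
  by_cases hNL : N ≤ L
  · rw [min_eq_left hNL]
  · rw [min_eq_right (by omega : L ≤ N)]
    by_cases hL : 0 ≤ L
    · rw [PySem.List.pyRange_one_append 0 L N hL (by omega), List.map_append, List.sum_append]
      have hz : ((PySem.List.pyRange L N 1).map g).sum = 0 := by
        apply List.sum_eq_zero
        intro x hx
        obtain ⟨c, hc, rfl⟩ := List.mem_map.mp hx
        rw [PySem.List.mem_pyRange_one] at hc
        exact h c hc.1
      rw [hz, add_zero]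
    · rw [PySem.List.pyRange_one_eq_nil (by omega : L ≤ (0 : Int))]
      simp only [List.map_nil, List.sum_nil]
      apply List.sum_eq_zero
      intro x hx
      obtain ⟨c, hc, rfl⟩ := List.mem_map.mp hx
      rw [PySem.List.mem_pyRange_one] at hc
      exact h c (by omega)

-- B's double scan with the cross predicate, characterised with no bounds on i, j.
lemma cross_scan2 (f2 : Int → Int → Int) (N M i j : Int) :
    ((PySem.List.pyRange 0 N 1).map (fun r =>
      ((PySem.List.pyRange 0 N 1).map (fun c =>
        if ¬(r = i ∧ c = j) ∧ ((r = i ∧ |c - j| < M) ∨ (c = j ∧ |r - i| < M)) then f2 r c else 0)).sum)).sum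
      = (if 0 ≤ i ∧ i < N then
           ((PySem.List.pyRange (max 0 (j - M + 1)) (min N j) 1).map (f2 i)).sum
           + ((PySem.List.pyRange (max 0 (j + 1)) (min N (j + M)) 1).map (f2 i)).sum
         else 0)
        + (if 0 ≤ j ∧ j < N then
           ((PySem.List.pyRange (max 0 (i - M + 1)) (min N i) 1).map (fun r => f2 r j)).sum
           + ((PySem.List.pyRange (max 0 (i + 1)) (min N (i + M)) 1).map (fun r => f2 r j)).sum
         else 0) := by
  -- split the predicate into a disjoint horizontal part and vertical part
  have hsplit : ∀ r ∈ PySem.List.pyRange 0 N 1,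
      ((PySem.List.pyRange 0 N 1).map (fun c =>
        if ¬(r = i ∧ c = j) ∧ ((r = i ∧ |c - j| < M) ∨ (c = j ∧ |r - i| < M)) then f2 r c else 0)).sum
      = ((PySem.List.pyRange 0 N 1).map (fun c =>
          if r = i ∧ ((j - M + 1 ≤ c ∧ c < j) ∨ (j + 1 ≤ c ∧ c < j + M)) then f2 r c else 0)).sum
        + ((PySem.List.pyRange 0 N 1).map (fun c =>
          if ((i - M + 1 ≤ r ∧ r < i) ∨ (i + 1 ≤ r ∧ r < i + M)) ∧ c = j then f2 r c else 0)).sum := by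
    intro r _
    rw [← PySem.List.sum_map_add_int]
    apply congrArg
    apply List.map_congr_left
    intro c _
    rw [show (if ¬(r = i ∧ c = j) ∧ ((r = i ∧ |c - j| < M) ∨ (c = j ∧ |r - i| < M)) then f2 r c else 0)
          = (if (r = i ∧ ((j - M + 1 ≤ c ∧ c < j) ∨ (j + 1 ≤ c ∧ c < j + M)))
              ∨ (((i - M + 1 ≤ r ∧ r < i) ∨ (i + 1 ≤ r ∧ r < i + M)) ∧ c = j) then f2 r c else 0)
        from if_congr (by rw [abs_lt, abs_lt]; omega) rfl rfl,
        ite_add_split _ _ _ (by omega)]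
  rw [List.map_congr_left hsplit, PySem.List.sum_map_add_int]
  -- horizontal part: only the row r = i contributes
  have hH : ((PySem.List.pyRange 0 N 1).map (fun r =>
      ((PySem.List.pyRange 0 N 1).map (fun c =>
        if r = i ∧ ((j - M + 1 ≤ c ∧ c < j) ∨ (j + 1 ≤ c ∧ c < j + M)) then f2 r c else 0)).sum)).sum
      = if 0 ≤ i ∧ i < N then
          ((PySem.List.pyRange (max 0 (j - M + 1)) (min N j) 1).map (f2 i)).sum
          + ((PySem.List.pyRange (max 0 (j + 1)) (min N (j + M)) 1).map (f2 i)).sum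
        else 0 := by
    have h1 : ∀ r ∈ PySem.List.pyRange 0 N 1,
        ((PySem.List.pyRange 0 N 1).map (fun c =>
          if r = i ∧ ((j - M + 1 ≤ c ∧ c < j) ∨ (j + 1 ≤ c ∧ c < j + M)) then f2 r c else 0)).sum
        = if r = i then
            ((PySem.List.pyRange 0 N 1).map (fun c =>
              if (j - M + 1 ≤ c ∧ c < j) ∨ (j + 1 ≤ c ∧ c < j + M) then f2 r c else 0)).sum
          else 0 := by
      intro r _
      exact sum_if_const (r = i) _ _ _
    rw [List.map_congr_left h1,
        sum_if_eq (fun r => ((PySem.List.pyRange 0 N 1).map (fun c =>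
          if (j - M + 1 ≤ c ∧ c < j) ∨ (j + 1 ≤ c ∧ c < j + M) then f2 r c else 0)).sum) 0 N i]
    by_cases hi : 0 ≤ i ∧ i < N
    · rw [if_pos hi, if_pos hi]
      have h2 : ∀ c ∈ PySem.List.pyRange 0 N 1,
          (if (j - M + 1 ≤ c ∧ c < j) ∨ (j + 1 ≤ c ∧ c < j + M) then f2 i c else 0)
          = (if j - M + 1 ≤ c ∧ c < j then f2 i c else 0)
            + (if j + 1 ≤ c ∧ c < j + M then f2 i c else 0) := by
        intro c _
        exact ite_add_split _ _ _ (by omega)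
      rw [List.map_congr_left h2, PySem.List.sum_map_add_int,
          sum_if_band (f2 i) 0 N (j - M + 1) j, sum_if_band (f2 i) 0 N (j + 1) (j + M)]
    · rw [if_neg hi, if_neg hi]
  -- vertical part: each row r ≠ i within reach contributes its cell in column j
  have hV : ((PySem.List.pyRange 0 N 1).map (fun r =>
      ((PySem.List.pyRange 0 N 1).map (fun c =>
        if ((i - M + 1 ≤ r ∧ r < i) ∨ (i + 1 ≤ r ∧ r < i + M)) ∧ c = j then f2 r c else 0)).sum)).sum
      = if 0 ≤ j ∧ j < N then
          ((PySem.List.pyRange (max 0 (i - M + 1)) (min N i) 1).map (fun r => f2 r j)).sum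
          + ((PySem.List.pyRange (max 0 (i + 1)) (min N (i + M)) 1).map (fun r => f2 r j)).sum
        else 0 := by
    have h1 : ∀ r ∈ PySem.List.pyRange 0 N 1,
        ((PySem.List.pyRange 0 N 1).map (fun c =>
          if ((i - M + 1 ≤ r ∧ r < i) ∨ (i + 1 ≤ r ∧ r < i + M)) ∧ c = j then f2 r c else 0)).sum
        = if (0 ≤ j ∧ j < N) ∧ ((i - M + 1 ≤ r ∧ r < i) ∨ (i + 1 ≤ r ∧ r < i + M)) then f2 r j else 0 := by
      intro r _
      rw [sum_if_const ((i - M + 1 ≤ r ∧ r < i) ∨ (i + 1 ≤ r ∧ r < i + M)) (fun c => c = j) (f2 r)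
            (PySem.List.pyRange 0 N 1)]
      rw [sum_if_eq (f2 r) 0 N j, ite_swap_conj]
    rw [List.map_congr_left h1,
        sum_if_const (0 ≤ j ∧ j < N)
          (fun r => (i - M + 1 ≤ r ∧ r < i) ∨ (i + 1 ≤ r ∧ r < i + M)) (fun r => f2 r j)
          (PySem.List.pyRange 0 N 1)]
    by_cases hj : 0 ≤ j ∧ j < N
    · rw [if_pos hj, if_pos hj]
      have h2 : ∀ r ∈ PySem.List.pyRange 0 N 1,
          (if (i - M + 1 ≤ r ∧ r < i) ∨ (i + 1 ≤ r ∧ r < i + M) then f2 r j else 0)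
          = (if i - M + 1 ≤ r ∧ r < i then f2 r j else 0)
            + (if i + 1 ≤ r ∧ r < i + M then f2 r j else 0) := by
        intro r _
        exact ite_add_split _ _ _ (by omega)
      rw [List.map_congr_left h2, PySem.List.sum_map_add_int,
          sum_if_band (fun r => f2 r j) 0 N (i - M + 1) i, sum_if_band (fun r => f2 r j) 0 N (i + 1) (i + M)]
    · rw [if_neg hj, if_neg hj]
  rw [hH, hV]

-- ===== VERDICT (by name: the statement is the Claim_ definition above) =====
theorem remove1_spec : Claim_equal_remove1 := by
  intro N M arr i j _hdom _hpre
  unfold Spec_remove1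
  simp only [remove1, remove1_alt]
  rw [(by decide : PySem.List.pyRange 0 4 1 = [0, 1, 2, 3])]
  simp only [List.foldl_cons, List.foldl_nil]
  rw [(by decide : (PySem.List.pyGet? ([0, 1, 0, -1] : List Int) 0).getD 0 = 0),
      (by decide : (PySem.List.pyGet? ([0, 1, 0, -1] : List Int) 1).getD 0 = 1),
      (by decide : (PySem.List.pyGet? ([0, 1, 0, -1] : List Int) 2).getD 0 = 0),
      (by decide : (PySem.List.pyGet? ([0, 1, 0, -1] : List Int) 3).getD 0 = -1),
      (by decide : (PySem.List.pyGet? ([1, 0, -1, 0] : List Int) 0).getD 0 = 1),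
      (by decide : (PySem.List.pyGet? ([1, 0, -1, 0] : List Int) 1).getD 0 = 0),
      (by decide : (PySem.List.pyGet? ([1, 0, -1, 0] : List Int) 2).getD 0 = -1),
      (by decide : (PySem.List.pyGet? ([1, 0, -1, 0] : List Int) 3).getD 0 = 0)]
  simp only [foldl_ite_add]
  -- A's four arms, each as a guarded clamped segment
  have hR : ((PySem.List.pyRange 1 M 1).map (fun a =>
        if 0 ≤ i + 0 * a ∧ i + 0 * a < N ∧ 0 ≤ j + 1 * a ∧ j + 1 * a < N then
          (PySem.List.pyGet? ((PySem.List.pyGet? arr (i + 0 * a)).getD []) (j + 1 * a)).getD 0 else 0)).sum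
      = if 0 ≤ i ∧ i < N then
          ((PySem.List.pyRange (max 0 (j + 1)) (min N (j + M)) 1).map
            (fun t => (PySem.List.pyGet? ((PySem.List.pyGet? arr i).getD []) t).getD 0)).sum
        else 0 := by
    have h1 : ∀ a ∈ PySem.List.pyRange 1 M 1,
        (if 0 ≤ i + 0 * a ∧ i + 0 * a < N ∧ 0 ≤ j + 1 * a ∧ j + 1 * a < N then
          (PySem.List.pyGet? ((PySem.List.pyGet? arr (i + 0 * a)).getD []) (j + 1 * a)).getD 0 else 0)
        = (if (0 ≤ i ∧ i < N) ∧ (0 ≤ j + a ∧ j + a < N) then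
          (PySem.List.pyGet? ((PySem.List.pyGet? arr i).getD []) (j + a)).getD 0 else 0) := by
      intro a _
      rw [(by ring : i + 0 * a = i), (by ring : j + 1 * a = j + a)]
      exact if_congr (by omega) rfl rfl
    rw [List.map_congr_left h1, sum_if_const (0 ≤ i ∧ i < N) _ _ _,
        fwd2 (fun t => (PySem.List.pyGet? ((PySem.List.pyGet? arr i).getD []) t).getD 0) N j M]
  have hD : ((PySem.List.pyRange 1 M 1).map (fun a =>
        if 0 ≤ i + 1 * a ∧ i + 1 * a < N ∧ 0 ≤ j + 0 * a ∧ j + 0 * a < N then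
          (PySem.List.pyGet? ((PySem.List.pyGet? arr (i + 1 * a)).getD []) (j + 0 * a)).getD 0 else 0)).sum
      = if 0 ≤ j ∧ j < N then
          ((PySem.List.pyRange (max 0 (i + 1)) (min N (i + M)) 1).map
            (fun t => (PySem.List.pyGet? ((PySem.List.pyGet? arr t).getD []) j).getD 0)).sum
        else 0 := by
    have h1 : ∀ a ∈ PySem.List.pyRange 1 M 1,
        (if 0 ≤ i + 1 * a ∧ i + 1 * a < N ∧ 0 ≤ j + 0 * a ∧ j + 0 * a < N then
          (PySem.List.pyGet? ((PySem.List.pyGet? arr (i + 1 * a)).getD []) (j + 0 * a)).getD 0 else 0)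
        = (if (0 ≤ j ∧ j < N) ∧ (0 ≤ i + a ∧ i + a < N) then
          (PySem.List.pyGet? ((PySem.List.pyGet? arr (i + a)).getD []) j).getD 0 else 0) := by
      intro a _
      rw [(by ring : i + 1 * a = i + a), (by ring : j + 0 * a = j)]
      exact if_congr (by omega) rfl rfl
    rw [List.map_congr_left h1, sum_if_const (0 ≤ j ∧ j < N) _ _ _,
        fwd2 (fun t => (PySem.List.pyGet? ((PySem.List.pyGet? arr t).getD []) j).getD 0) N i M]
  have hL : ((PySem.List.pyRange 1 M 1).map (fun a =>
        if 0 ≤ i + 0 * a ∧ i + 0 * a < N ∧ 0 ≤ j + -1 * a ∧ j + -1 * a < N then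
          (PySem.List.pyGet? ((PySem.List.pyGet? arr (i + 0 * a)).getD []) (j + -1 * a)).getD 0 else 0)).sum
      = if 0 ≤ i ∧ i < N then
          ((PySem.List.pyRange (max 0 (j - M + 1)) (min N j) 1).map
            (fun t => (PySem.List.pyGet? ((PySem.List.pyGet? arr i).getD []) t).getD 0)).sum
        else 0 := by
    have h1 : ∀ a ∈ PySem.List.pyRange 1 M 1,
        (if 0 ≤ i + 0 * a ∧ i + 0 * a < N ∧ 0 ≤ j + -1 * a ∧ j + -1 * a < N then
          (PySem.List.pyGet? ((PySem.List.pyGet? arr (i + 0 * a)).getD []) (j + -1 * a)).getD 0 else 0)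
        = (if (0 ≤ i ∧ i < N) ∧ (0 ≤ j - a ∧ j - a < N) then
          (PySem.List.pyGet? ((PySem.List.pyGet? arr i).getD []) (j - a)).getD 0 else 0) := by
      intro a _
      rw [(by ring : i + 0 * a = i), (by ring : j + -1 * a = j - a)]
      exact if_congr (by omega) rfl rfl
    rw [List.map_congr_left h1, sum_if_const (0 ≤ i ∧ i < N) _ _ _,
        bwd2 (fun t => (PySem.List.pyGet? ((PySem.List.pyGet? arr i).getD []) t).getD 0) N j M]
  have hU : ((PySem.List.pyRange 1 M 1).map (fun a =>
        if 0 ≤ i + -1 * a ∧ i + -1 * a < N ∧ 0 ≤ j + 0 * a ∧ j + 0 * a < N then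
          (PySem.List.pyGet? ((PySem.List.pyGet? arr (i + -1 * a)).getD []) (j + 0 * a)).getD 0 else 0)).sum
      = if 0 ≤ j ∧ j < N then
          ((PySem.List.pyRange (max 0 (i - M + 1)) (min N i) 1).map
            (fun t => (PySem.List.pyGet? ((PySem.List.pyGet? arr t).getD []) j).getD 0)).sum
        else 0 := by
    have h1 : ∀ a ∈ PySem.List.pyRange 1 M 1,
        (if 0 ≤ i + -1 * a ∧ i + -1 * a < N ∧ 0 ≤ j + 0 * a ∧ j + 0 * a < N then
          (PySem.List.pyGet? ((PySem.List.pyGet? arr (i + -1 * a)).getD []) (j + 0 * a)).getD 0 else 0)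
        = (if (0 ≤ j ∧ j < N) ∧ (0 ≤ i - a ∧ i - a < N) then
          (PySem.List.pyGet? ((PySem.List.pyGet? arr (i - a)).getD []) j).getD 0 else 0) := by
      intro a _
      rw [(by ring : i + -1 * a = i - a), (by ring : j + 0 * a = j)]
      exact if_congr (by omega) rfl rfl
    rw [List.map_congr_left h1, sum_if_const (0 ≤ j ∧ j < N) _ _ _,
        bwd2 (fun t => (PySem.List.pyGet? ((PySem.List.pyGet? arr t).getD []) j).getD 0) N i M]
  -- B's side: extend the clipped scan back to [0,N)² (skipped cells read as 0), then characterise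
  have hBin : ∀ r ∈ PySem.List.pyRange 0 (min N (PySem.List.len arr)) 1,
      ((PySem.List.pyRange 0 (min N (PySem.List.len ((PySem.List.pyGet? arr r).getD []))) 1).map (fun c =>
        if ¬(r = i ∧ c = j) ∧ ((r = i ∧ |c - j| < M) ∨ (c = j ∧ |r - i| < M)) then
          (PySem.List.pyGet? ((PySem.List.pyGet? arr r).getD []) c).getD 0 else 0)).sum
      = ((PySem.List.pyRange 0 N 1).map (fun c =>
          if ¬(r = i ∧ c = j) ∧ ((r = i ∧ |c - j| < M) ∨ (c = j ∧ |r - i| < M)) then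
            (PySem.List.pyGet? ((PySem.List.pyGet? arr r).getD []) c).getD 0 else 0)).sum := by
    intro r _
    refine (sum_truncate _ N (PySem.List.len ((PySem.List.pyGet? arr r).getD [])) ?_).symm
    intro c hc
    rw [PySem.List.len_eq] at hc
    have hnone : PySem.List.pyGet? ((PySem.List.pyGet? arr r).getD []) c = none := by
      rw [PySem.List.pyGet?_eq_none_iff]
      simp only [PySem.Raise.InRange, not_and, not_lt]
      omega
    rw [hnone]
    by_cases hp : ¬(r = i ∧ c = j) ∧ ((r = i ∧ |c - j| < M) ∨ (c = j ∧ |r - i| < M)) <;> simp [hp]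
  have hBout : ((PySem.List.pyRange 0 (min N (PySem.List.len arr)) 1).map (fun r =>
      ((PySem.List.pyRange 0 N 1).map (fun c =>
        if ¬(r = i ∧ c = j) ∧ ((r = i ∧ |c - j| < M) ∨ (c = j ∧ |r - i| < M)) then
          (PySem.List.pyGet? ((PySem.List.pyGet? arr r).getD []) c).getD 0 else 0)).sum)).sum
      = ((PySem.List.pyRange 0 N 1).map (fun r =>
          ((PySem.List.pyRange 0 N 1).map (fun c =>
            if ¬(r = i ∧ c = j) ∧ ((r = i ∧ |c - j| < M) ∨ (c = j ∧ |r - i| < M)) then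
              (PySem.List.pyGet? ((PySem.List.pyGet? arr r).getD []) c).getD 0 else 0)).sum)).sum := by
    refine (sum_truncate _ N (PySem.List.len arr) ?_).symm
    intro r hr
    rw [PySem.List.len_eq] at hr
    have hrow : (PySem.List.pyGet? arr r).getD [] = ([] : List Int) := by
      have hn : PySem.List.pyGet? arr r = none := by
        rw [PySem.List.pyGet?_eq_none_iff]
        simp only [PySem.Raise.InRange, not_and, not_lt]
        omega
      rw [hn, Option.getD_none]
    apply List.sum_eq_zero
    intro x hx
    obtain ⟨c, _, rfl⟩ := List.mem_map.mp hx
    rw [hrow]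
    have hn2 : PySem.List.pyGet? ([] : List Int) c = none := by
      rw [PySem.List.pyGet?_eq_none_iff]
      simp only [PySem.Raise.InRange, List.length_nil]
      omega
    rw [hn2]
    by_cases hp : ¬(r = i ∧ c = j) ∧ ((r = i ∧ |c - j| < M) ∨ (c = j ∧ |r - i| < M)) <;> simp [hp]
  rw [hR, hD, hL, hU, PySem.List.foldl_add, List.map_congr_left hBin, hBout,
      cross_scan2 (fun r c => (PySem.List.pyGet? ((PySem.List.pyGet? arr r).getD []) c).getD 0) N M i j]
  split_ifs <;> ring
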